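-- pv_equiv track=rewrite | github.com/MulhamKassab/MuKa_GWL | newPlotting.py | find_enclosing_nfl_lines
-- ===== SOURCE A (Python) =====
-- def find_enclosing_nfl_lines(calculated_nfl, grouped_points):
--     nfl_values = sorted(grouped_points.keys())
--     lower_nfl = None
--     upper_nfl = None
--     for nfl in nfl_values:
--         if nfl <= calculated_nfl:
--             lower_nfl = nfl
--         if nfl > calculated_nfl:
--             upper_nfl = nfl
--             break
--     return lower_nfl, upper_nfl
-- ===== SOURCE B (Python) =====
-- def find_enclosing_nfl_lines(calculated_nfl, grouped_points):
--     lower_nfl = None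
--     upper_nfl = None
--     for nfl in grouped_points:
--         if nfl <= calculated_nfl:
--             if lower_nfl is None or nfl > lower_nfl:
--                 lower_nfl = nfl
--         elif upper_nfl is None or nfl < upper_nfl:
--             upper_nfl = nfl
--     return lower_nfl, upper_nfl
-- ===== Notes on version B (the rewrite author's own statement) =====
-- stated objective: faster
-- what changed: Replaces sort-then-scan-with-break by a single unsorted pass that tracks the maximum key <= target and the minimum key > target.
import Mathlib
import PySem

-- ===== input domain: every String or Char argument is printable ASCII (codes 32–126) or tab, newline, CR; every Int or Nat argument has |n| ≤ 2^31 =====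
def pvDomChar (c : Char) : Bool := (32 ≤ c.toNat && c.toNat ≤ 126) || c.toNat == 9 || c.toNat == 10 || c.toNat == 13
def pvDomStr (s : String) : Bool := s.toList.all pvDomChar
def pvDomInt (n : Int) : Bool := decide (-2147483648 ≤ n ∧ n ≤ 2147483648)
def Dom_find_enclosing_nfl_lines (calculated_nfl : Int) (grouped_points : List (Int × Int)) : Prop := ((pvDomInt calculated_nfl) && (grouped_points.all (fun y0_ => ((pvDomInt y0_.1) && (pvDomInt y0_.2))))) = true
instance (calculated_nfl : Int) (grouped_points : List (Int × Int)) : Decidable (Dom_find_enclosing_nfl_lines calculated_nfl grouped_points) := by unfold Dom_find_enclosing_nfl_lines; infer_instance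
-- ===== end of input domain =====

-- B replaces A's sort-then-scan-with-break by one unsorted pass tracking the
-- max key ≤ target and the min key > target (objective: faster, O(n) vs O(n log n)).

-- ===== PORT A =====
-- the 'for nfl in nfl_values: … break' loop of A, carrying lower_nfl and upper_nfl
def pvLoopA (t : Int) (lo hi : Option Int) : List Int → Option Int × Option Int
  | [] => (lo, hi)
  | k :: ks =>
    let lo' := if k ≤ t then some k else lo
    if k > t then (lo', some k) else pvLoopA t lo' hi ks

def find_enclosing_nfl_lines (calculated_nfl : Int) (grouped_points : List (Int × Int)) : Option Int × Option Int :=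
  let nfl_values := PySem.List.sorted (PySem.List.dedup (grouped_points.map Prod.fst)) (fun x => x) false
  pvLoopA calculated_nfl none none nfl_values

-- ===== PORT B =====
-- the body of B's single for-loop: update (lower_nfl, upper_nfl) with one key
def pvStepB (t : Int) (s : Option Int × Option Int) (nfl : Int) : Option Int × Option Int :=
  if nfl ≤ t then
    ((match s.1 with | none => some nfl | some v => if nfl > v then some nfl else some v), s.2)
  else
    (s.1, (match s.2 with | none => some nfl | some v => if nfl < v then some nfl else some v))

def find_enclosing_nfl_lines_alt (calculated_nfl : Int) (grouped_points : List (Int × Int)) : Option Int × Option Int :=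
  (PySem.List.dedup (grouped_points.map Prod.fst)).foldl (pvStepB calculated_nfl) (none, none)

-- ===== PRECONDITION & SPEC =====
def Spec_find_enclosing_nfl_lines (calculated_nfl : Int) (grouped_points : List (Int × Int)) (out : Option Int × Option Int) : Prop := out = find_enclosing_nfl_lines_alt calculated_nfl grouped_points
instance (calculated_nfl : Int) (grouped_points : List (Int × Int)) (out : Option Int × Option Int) : Decidable (Spec_find_enclosing_nfl_lines calculated_nfl grouped_points out) := by unfold Spec_find_enclosing_nfl_lines; infer_instance

-- ===== CLAIM (what is proved, stated in full; the proofs are below) =====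
def Claim_equal_find_enclosing_nfl_lines : Prop := ∀ (calculated_nfl : Int) (grouped_points : List (Int × Int)), Dom_find_enclosing_nfl_lines calculated_nfl grouped_points → Spec_find_enclosing_nfl_lines calculated_nfl grouped_points (find_enclosing_nfl_lines calculated_nfl grouped_points)

-- ===== LEMMAS AND PROOFS =====

-- B's step is right-commutative, so its fold is invariant under permutation.
theorem pvStepB_comm (t : Int) (s : Option Int × Option Int) (a b : Int) :
    pvStepB t (pvStepB t s a) b = pvStepB t (pvStepB t s b) a := by
  obtain ⟨lo, hi⟩ := s
  rcases lo with _ | v <;> rcases hi with _ | w <;>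
    simp only [pvStepB] <;> split_ifs <;> (try rfl) <;>
    (simp only [Prod.mk.injEq];
     constructor <;> first | rfl | trivial | omega | (split_ifs <;> simp only [Option.some.injEq] <;> omega))

theorem pvFoldB_perm (t : Int) {l₁ l₂ : List Int} (h : l₁.Perm l₂) :
    ∀ s, l₁.foldl (pvStepB t) s = l₂.foldl (pvStepB t) s := by
  induction h with
  | nil => intro s; rfl
  | cons x _ ih => intro s; simp only [List.foldl_cons, ih]
  | swap x y l => intro s; simp only [List.foldl_cons, pvStepB_comm]
  | trans _ _ ih₁ ih₂ => intro s; simp only [ih₁, ih₂]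

-- once B has seen a key k with t < k ≤ every remaining key, its state is frozen
theorem pvFoldB_stop (t : Int) : ∀ (ks : List Int) (lo : Option Int) (k : Int),
    t < k → (∀ x ∈ ks, k ≤ x) →
    ks.foldl (pvStepB t) (lo, some k) = (lo, some k) := by
  intro ks
  induction ks with
  | nil => intro lo k _ _; rfl
  | cons x xs ih =>
    intro lo k hk hall
    have hx : k ≤ x := hall x (by simp)
    have hstep : pvStepB t (lo, some k) x = (lo, some k) := by
      simp only [pvStepB]
      split_ifs with h1 h2 <;> first | omega | rfl
    simp only [List.foldl_cons, hstep]
    exact ih lo k hk (fun y hy => hall y (by simp [hy]))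

-- on a sorted list, A's break-loop equals B's fold
theorem pvLoopA_eq_foldB (t : Int) : ∀ (ks : List Int), ks.Pairwise (· ≤ ·) →
    ∀ lo : Option Int, (∀ v ∈ lo, ∀ x ∈ ks, v ≤ x) →
    pvLoopA t lo none ks = ks.foldl (pvStepB t) (lo, none) := by
  intro ks
  induction ks with
  | nil => intro _ lo _; rfl
  | cons k xs ih =>
    intro hp lo hlo
    have hk : ∀ x ∈ xs, k ≤ x := (List.pairwise_cons.mp hp).1
    have hpt : xs.Pairwise (· ≤ ·) := (List.pairwise_cons.mp hp).2
    by_cases hkt : k ≤ t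
    · have hlo' : pvStepB t (lo, none) k = (some k, none) := by
        rcases lo with _ | v
        · simp [pvStepB, hkt]
        · have hv : v ≤ k := hlo v rfl k (by simp)
          simp only [pvStepB, if_pos hkt]
          split_ifs with h <;> simp only [Prod.mk.injEq, Option.some.injEq] <;> refine ⟨by omega, trivial⟩
      have hA : pvLoopA t lo none (k :: xs) = pvLoopA t (some k) none xs := by
        simp [pvLoopA, hkt]
      rw [hA, List.foldl_cons, hlo', ih hpt (some k) (by intro v hv x hx; cases hv; exact hk x hx)]
    · have hkt' : t < k := by omega
      have hA : pvLoopA t lo none (k :: xs) = (lo, some k) := by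
        simp [pvLoopA, hkt, hkt']
      have hstep : pvStepB t (lo, none) k = (lo, some k) := by
        simp [pvStepB]; omega
      rw [hA, List.foldl_cons, hstep, pvFoldB_stop t xs lo k hkt' hk]

-- ===== VERDICT (by name: the statement is the Claim_ definition above) =====
theorem find_enclosing_nfl_lines_spec : Claim_equal_find_enclosing_nfl_lines := by
  intro t gp _
  unfold Spec_find_enclosing_nfl_lines find_enclosing_nfl_lines find_enclosing_nfl_lines_alt
  have hpw : (PySem.List.sorted (PySem.List.dedup (gp.map Prod.fst)) (fun x => x) false).Pairwise (· ≤ ·) :=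
    PySem.List.sorted_pairwise _ _
  have hperm : (PySem.List.sorted (PySem.List.dedup (gp.map Prod.fst)) (fun x => x) false).Perm
      (PySem.List.dedup (gp.map Prod.fst)) := PySem.List.sorted_perm _ _ _
  rw [pvLoopA_eq_foldB t _ hpw none (by intro v hv; cases hv)]
  exact pvFoldB_perm t hperm _
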